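-- pv_equiv track=rewrite | github.com/sunir/bashguard | bashguard/rules/container_network.py | _is_sensitive_volume
-- ===== SOURCE A (Python) =====
-- _SENSITIVE_MOUNT_PREFIXES = (
--     "/etc", "/proc", "/sys", "/dev", "/run",
--     "/boot", "/bin", "/sbin", "/usr", "/lib",
--     "/root", "/home", "/var",
-- )
--
-- def _is_sensitive_volume(vol_spec: str) -> bool:
--     """Return True if a -v mount spec maps a sensitive host path."""
--     # vol_spec format: host_path:container_path[:options]
--     parts = vol_spec.split(":")
--     if not parts:
--         return False
--     host_path = parts[0].strip("'\"")
--     if host_path == "/":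
--         return True
--     return any(host_path == p or host_path.startswith(p + "/")
--                for p in _SENSITIVE_MOUNT_PREFIXES)
-- ===== SOURCE B (Python) =====
-- _SENSITIVE_TOP_DIRS = frozenset({
--     "etc", "proc", "sys", "dev", "run",
--     "boot", "bin", "sbin", "usr", "lib",
--     "root", "home", "var",
-- })
--
-- def _is_sensitive_volume(vol_spec: str) -> bool:
--     """Return True if a -v mount spec maps a sensitive host path."""
--     # vol_spec format: host_path:container_path[:options]
--     host_path = vol_spec.split(":")[0].strip("'\"")
--     if host_path == "/":
--         return True
--     if not host_path.startswith("/"):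
--         return False
--     # key extraction: the first path segment after the leading '/',
--     # then a single O(1) set-membership test
--     return host_path.split("/")[1] in _SENSITIVE_TOP_DIRS
-- ===== Notes on version B (the rewrite author's own statement) =====
-- stated objective: idiomatic
-- what changed: Replaces the 13-way prefix scan (equality or p+'/'-prefix test per sensitive prefix) by extracting the first path segment after the leading '/' and doing one frozenset membership test.
import Mathlib
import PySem

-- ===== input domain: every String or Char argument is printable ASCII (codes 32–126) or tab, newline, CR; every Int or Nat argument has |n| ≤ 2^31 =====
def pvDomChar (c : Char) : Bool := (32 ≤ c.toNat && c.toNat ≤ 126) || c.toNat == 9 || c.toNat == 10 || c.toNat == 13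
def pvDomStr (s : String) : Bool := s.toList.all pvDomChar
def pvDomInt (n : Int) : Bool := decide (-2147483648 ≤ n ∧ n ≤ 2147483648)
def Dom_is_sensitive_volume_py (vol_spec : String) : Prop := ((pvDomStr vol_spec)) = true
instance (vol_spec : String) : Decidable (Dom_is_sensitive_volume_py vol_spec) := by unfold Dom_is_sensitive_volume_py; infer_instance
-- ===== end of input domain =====

-- B replaces A's 13-way prefix scan by extracting the first path segment and one set-membership test (idiomatic rewrite, same behaviour).

-- ===== PORT A =====
def sensitivePrefixes : List String :=
  ["/etc", "/proc", "/sys", "/dev", "/run",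
   "/boot", "/bin", "/sbin", "/usr", "/lib",
   "/root", "/home", "/var"]

def is_sensitive_volume_py (vol_spec : String) : Bool :=
  match PySem.Str.split? vol_spec ":" with
  | none => false        -- unreachable: the separator ":" is nonempty
  | some parts =>
    match parts with
    | [] => false        -- 'if not parts: return False'
    | p0 :: _ =>
      let host_path := PySem.Str.stripChars p0 "'\""
      if host_path = "/" then true
      else sensitivePrefixes.any (fun p =>
        host_path == p ||
        -- 'host_path.startswith(p + "/")': the concatenation p + "/" is ported
        -- exactly on the char-list side (toList of a Python str concat)
        PySem.Chars.startswith host_path.toList (p.toList ++ ['/']))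

-- ===== PORT B =====
def sensitiveTopDirs : PySem.Set String :=
  PySem.Set.ofList
    ["etc", "proc", "sys", "dev", "run",
     "boot", "bin", "sbin", "usr", "lib",
     "root", "home", "var"]

def is_sensitive_volume_py_alt (vol_spec : String) : Bool :=
  -- vol_spec.split(":")[0]: ':' is nonempty so split? is some and the result nonempty; [0] via headD
  let host_path := PySem.Str.stripChars (((PySem.Str.split? vol_spec ":").getD []).headD "") "'\""
  if host_path = "/" then true
  else if !(PySem.Str.startswith host_path "/") then false
  else
    -- host_path.split("/")[1]: guarded by startswith "/", index 1 always exists; via getD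
    PySem.Set.contains sensitiveTopDirs (((PySem.Str.split? host_path "/").getD []).getD 1 "")

-- ===== PRECONDITION & SPEC =====
def Spec_is_sensitive_volume_py (vol_spec : String) (out : Bool) : Prop := out = is_sensitive_volume_py_alt vol_spec
instance (vol_spec : String) (out : Bool) : Decidable (Spec_is_sensitive_volume_py vol_spec out) := by unfold Spec_is_sensitive_volume_py; infer_instance

-- ===== CLAIM (what is proved, stated in full; the proofs are below) =====
def Claim_equal_is_sensitive_volume_py : Prop := ∀ (vol_spec : String), Dom_is_sensitive_volume_py vol_spec → Spec_is_sensitive_volume_py vol_spec (is_sensitive_volume_py vol_spec)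

-- ===== LEMMAS AND PROOFS =====

theorem modifyHead_id_list (l : List (List Char)) : List.modifyHead (fun x => x) l = l := by
  cases l <;> simp

-- PySem.Chars.splitOn with a one-char separator is Mathlib's List.splitOnP
theorem splitOn_go_spec (c : Char) :
    ∀ (fuel : Nat) (l cur : List Char) (acc : List (List Char)) (_ : l.length < fuel),
      PySem.Chars.splitOn.go [c] fuel l cur acc
        = acc.reverse ++ (List.splitOnP (· == c) l).modifyHead (cur.reverse ++ ·) := by
  intro fuel
  induction fuel with
  | zero => intro l cur acc h; omega
  | succ n ih =>
    intro l cur acc h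
    cases l with
    | nil =>
      simp [PySem.Chars.splitOn.go]
    | cons x xs =>
      by_cases hx : x = c
      · subst hx
        rw [show PySem.Chars.splitOn.go [x] (n+1) (x :: xs) cur acc
              = PySem.Chars.splitOn.go [x] n xs [] (cur.reverse :: acc) by
            simp [PySem.Chars.splitOn.go, List.isPrefixOf]]
        rw [ih xs [] (cur.reverse :: acc) (by simpa using Nat.lt_of_succ_lt_succ h)]
        simp [List.splitOnP_cons, modifyHead_id_list]
      · rw [show PySem.Chars.splitOn.go [c] (n+1) (x :: xs) cur acc
              = PySem.Chars.splitOn.go [c] n xs (x :: cur) acc by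
            simp [PySem.Chars.splitOn.go, List.isPrefixOf, Ne.symm hx]]
        rw [ih xs (x :: cur) acc (by simpa using Nat.lt_of_succ_lt_succ h)]
        rw [List.splitOnP_cons]
        simp [hx, List.modifyHead_modifyHead, Function.comp_def]

theorem splitOn_eq_splitOnP (c : Char) (l : List Char) :
    PySem.Chars.splitOn l [c] = List.splitOnP (· == c) l := by
  have := splitOn_go_spec c (l.length + 1) l [] [] (by omega)
  simpa [PySem.Chars.splitOn, modifyHead_id_list] using this

-- the first piece of splitOnP is the takeWhile up to the first separator
theorem splitOnP_head (c : Char) (l : List Char) :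
    ∃ t, List.splitOnP (· == c) l = (l.takeWhile (· != c)) :: t := by
  induction l with
  | nil => exact ⟨[], by simp [List.splitOnP_nil]⟩
  | cons x xs ih =>
    obtain ⟨t, ht⟩ := ih
    by_cases hx : x = c
    · subst hx
      exact ⟨List.splitOnP (· == x) xs, by simp [List.splitOnP_cons]⟩
    · exact ⟨t, by simp [List.splitOnP_cons, hx, ht]⟩

-- characterisation of A's per-prefix test by the first path segment
theorem takeWhile_eq_iff (d rest : List Char) (hd : ('/' : Char) ∉ d) :
    rest.takeWhile (· != '/') = d ↔ (rest = d ∨ (d ++ ['/']) <+: rest) := by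
  induction d generalizing rest with
  | nil =>
    cases rest with
    | nil => simp
    | cons x xs =>
      by_cases hx : x = '/'
      · subst hx; simp [List.cons_prefix_cons]
      · simp [hx, Ne.symm hx, List.cons_prefix_cons]
  | cons a d' ih =>
    have ha : a ≠ '/' := fun h => hd (h ▸ List.mem_cons_self)
    have hd' : ('/' : Char) ∉ d' := fun h => hd (List.mem_cons_of_mem _ h)
    cases rest with
    | nil => simp
    | cons x xs =>
      by_cases hx : x = '/'
      · subst hx
        simp [List.cons_prefix_cons, ha, Ne.symm ha]
      · simp only [List.takeWhile_cons, hx, bne_iff_ne, ne_eq, not_false_iff, if_pos,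
          List.cons_append, List.cons_prefix_cons, List.cons.injEq]
        constructor
        · rintro ⟨hxa, htw⟩
          rcases (ih xs hd').mp htw with h | h
          · exact Or.inl ⟨hxa, h⟩
          · exact Or.inr ⟨hxa.symm, h⟩
        · rintro (⟨hxa, hxs⟩ | ⟨hax, hpre⟩)
          · exact ⟨hxa, (ih xs hd').mpr (Or.inl hxs)⟩
          · exact ⟨hax.symm, (ih xs hd').mpr (Or.inr hpre)⟩

-- the two literal tables, on the char-list side
def dirsChars : List (List Char) :=
  [['e','t','c'], ['p','r','o','c'], ['s','y','s'], ['d','e','v'], ['r','u','n'],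
   ['b','o','o','t'], ['b','i','n'], ['s','b','i','n'], ['u','s','r'], ['l','i','b'],
   ['r','o','o','t'], ['h','o','m','e'], ['v','a','r']]

theorem prefixes_toList : sensitivePrefixes.map String.toList = dirsChars.map ('/' :: ·) := by decide

theorem dirs_toList : (["etc", "proc", "sys", "dev", "run", "boot", "bin", "sbin", "usr", "lib",
    "root", "home", "var"] : List String).map String.toList = dirsChars := by decide

theorem dirs_no_slash : ∀ d ∈ dirsChars, ('/' : Char) ∉ d := by decide

theorem mem_dirs_iff (l : List Char) :
    String.ofList l ∈ (["etc", "proc", "sys", "dev", "run", "boot", "bin", "sbin", "usr", "lib",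
      "root", "home", "var"] : List String) ↔ l ∈ dirsChars := by
  rw [← dirs_toList]
  constructor
  · intro h; exact List.mem_map.mpr ⟨_, h, by simp⟩
  · intro h
    rcases List.mem_map.mp h with ⟨s, hs, hst⟩
    have hsl : s = String.ofList l := String.ext (by simp [hst])
    rwa [← hsl]

-- A's scan over the prefixes, in list form
theorem anyA_eq (hl : List Char) :
    (sensitivePrefixes.any (fun p => hl == p.toList || PySem.Chars.startswith hl (p.toList ++ ['/'])))
      = dirsChars.any (fun d => hl == ('/' :: d) || PySem.Chars.startswith hl (('/' :: d) ++ ['/'])) := by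
  have h1 : (sensitivePrefixes.map String.toList).any
      (fun q => hl == q || PySem.Chars.startswith hl (q ++ ['/']))
      = sensitivePrefixes.any (fun p => hl == p.toList || PySem.Chars.startswith hl (p.toList ++ ['/'])) := by
    rw [List.any_map]; rfl
  rw [← h1, prefixes_toList, List.any_map]; rfl

-- the core equality after the shared parsing step
theorem core_eq (host : String) :
    (if host = "/" then true
     else sensitivePrefixes.any (fun p =>
       host == p || PySem.Chars.startswith host.toList (p.toList ++ ['/'])))
    = (if host = "/" then true
       else if !(PySem.Str.startswith host "/") then false
       else PySem.Set.contains sensitiveTopDirs (((PySem.Str.split? host "/").getD []).getD 1 "")) := by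
  by_cases hroot : host = "/"
  · simp [hroot]
  · simp only [hroot, if_false]
    have hbeq : ∀ p : String, (host == p) = (host.toList == p.toList) := by
      intro p
      by_cases h : host = p
      · simp [h]
      · have : host.toList ≠ p.toList := fun hc => h (String.ext hc)
        simp [h, this]
    have hA : (sensitivePrefixes.any (fun p =>
        host == p || PySem.Chars.startswith host.toList (p.toList ++ ['/'])))
        = dirsChars.any (fun d =>
            host.toList == ('/' :: d) || PySem.Chars.startswith host.toList (('/' :: d) ++ ['/'])) := by
      rw [← anyA_eq]
      exact List.any_congr rfl (fun p => by rw [hbeq p])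
    rw [hA]
    cases hl : host.toList with
    | nil =>
      have hsw : PySem.Str.startswith host "/" = false := by
        simp [PySem.Str.startswith, PySem.Chars.startswith, hl]
      rw [hsw, if_pos (show (!false) = true from rfl)]
      rw [List.any_eq_false]
      intro d _
      simp [PySem.Chars.startswith]
    | cons x rest =>
      by_cases hx : x = '/'
      · subst hx
        have hsw : PySem.Str.startswith host "/" = true := by
          simp [PySem.Str.startswith, PySem.Chars.startswith, hl, List.isPrefixOf]
        rw [hsw, if_neg (show ¬((!true) = true) from by simp)]
        obtain ⟨t, ht⟩ := splitOnP_head '/' rest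
        have hsplit : PySem.Str.split? host "/" =
            some (List.map String.ofList ([] :: (rest.takeWhile (· != '/')) :: t)) := by
          simp only [PySem.Str.split?, PySem.Chars.split?]
          rw [show ("/" : String).toList = ['/'] from rfl]
          rw [show host.toList = '/' :: rest from hl]
          simp [splitOn_eq_splitOnP, List.splitOnP_cons, ht]
        rw [hsplit]
        simp only [Option.getD_some, List.map_cons, List.getD_cons_succ, List.getD_cons_zero]
        have hseg : (String.ofList (rest.takeWhile (· != '/'))).toList
            = rest.takeWhile (· != '/') := by simp
        have hiff : ∀ d : List Char,
            ((('/' :: rest : List Char) == '/' :: d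
              || PySem.Chars.startswith ('/' :: rest) (('/' :: d) ++ ['/'])) = true)
            ↔ (rest = d ∨ (d ++ ['/']) <+: rest) := by
          intro d
          simp [PySem.Chars.startswith_iff, List.cons_prefix_cons]
        rw [Bool.eq_iff_iff, List.any_eq_true]
        constructor
        · rintro ⟨d, hdmem, hdprop⟩
          have hrd : rest.takeWhile (· != '/') = d :=
            (takeWhile_eq_iff d rest (dirs_no_slash d hdmem)).mpr ((hiff d).mp hdprop)
          have hmem : String.ofList (rest.takeWhile (· != '/')) ∈ sensitiveTopDirs := by
            rw [sensitiveTopDirs, PySem.Set.mem_ofList, mem_dirs_iff, hrd]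
            exact hdmem
          simpa [PySem.Set.contains, List.contains_iff_mem] using hmem
        · intro h
          have hmem : String.ofList (rest.takeWhile (· != '/')) ∈ sensitiveTopDirs := by
            simpa [PySem.Set.contains, List.contains_iff_mem] using h
          rw [sensitiveTopDirs, PySem.Set.mem_ofList, mem_dirs_iff] at hmem
          refine ⟨rest.takeWhile (· != '/'), hmem, (hiff _).mpr ?_⟩
          exact (takeWhile_eq_iff _ rest (dirs_no_slash _ hmem)).mp rfl
      · have hsw : PySem.Str.startswith host "/" = false := by
          simp [PySem.Str.startswith, PySem.Chars.startswith, hl, List.isPrefixOf, Ne.symm hx]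
        rw [hsw, if_pos (show (!false) = true from rfl)]
        rw [List.any_eq_false]
        intro d _
        simp only [Bool.or_eq_true, not_or]
        constructor
        · simp only [beq_iff_eq, List.cons.injEq, not_and]
          intro hc; exact absurd hc hx
        · intro hc
          exact hx (List.cons_prefix_cons.mp ((PySem.Chars.startswith_iff _ _).mp hc)).1.symm

-- ===== VERDICT (by name: the statement is the Claim_ definition above) =====
theorem is_sensitive_volume_py_spec : Claim_equal_is_sensitive_volume_py := by
  intro vol_spec _
  unfold Spec_is_sensitive_volume_py
  unfold is_sensitive_volume_py is_sensitive_volume_py_alt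
  have hsplit : PySem.Str.split? vol_spec ":" =
      some (List.map String.ofList (List.splitOnP (· == ':') vol_spec.toList)) := by
    simp only [PySem.Str.split?, PySem.Chars.split?]
    rw [show (":" : String).toList = [':'] from rfl]
    simp [splitOn_eq_splitOnP]
  rw [hsplit]
  obtain ⟨l0, ls, hls⟩ : ∃ l0 ls, List.splitOnP (· == ':') vol_spec.toList = l0 :: ls := by
    cases h : List.splitOnP (· == ':') vol_spec.toList with
    | nil => exact absurd h (List.splitOnP_ne_nil _ _)
    | cons a b => exact ⟨a, b, rfl⟩
  rw [hls]
  simp only [List.map_cons, Option.getD_some, List.headD_cons]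
  exact core_eq (PySem.Str.stripChars (String.ofList l0) "'\"")
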